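-- pv_equiv track=rewrite | github.com/pbcquoc/coding-interview-python | graph_algorithm/height_tree_v2.py | fillHeight
-- ===== SOURCE A (Python) =====
-- def fillHeight(p, node, visited, height):
--     if p[node] == -1:
--         visited[node] = 1
--         return 0
--
--     if visited[node]:
--         return height[node]
--
--     visited[node] = 1
--     height[node] = 1 + fillHeight(p, p[node], visited, height)
--
--     return height[node]
-- ===== SOURCE B (Python) =====
-- # Iterative re-implementation: explicit parent-pointer walk with a stack instead of
-- # recursion + memoization; same mutations of visited/height and same return value.
-- def fillHeight(p, node, visited, height):
--     stack = []
--     cur = node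
--     while p[cur] != -1 and not visited[cur]:
--         visited[cur] = 1
--         stack.append(cur)
--         cur = p[cur]
--     if p[cur] == -1:
--         visited[cur] = 1
--         d = 0
--     else:
--         d = height[cur]
--     while stack:
--         d += 1
--         height[stack.pop()] = d
--     return d
-- ===== Notes on version B (the rewrite author's own statement) =====
-- stated objective: alternative
-- what changed: Replaced A's recursion-with-memoization by an explicit iterative walk: a while loop follows parent pointers pushing nodes on a stack until it reaches a root or a visited node, then assigns heights top-down while popping; same in-place mutations of visited/height and same return value, without Python call-stack recursion (no RecursionError on deep chains).
-- outside the precondition, e.g. on fillHeight([1, -1, 99], 0, [0, 0, 0], [0, 0, 0]): A returns 1, B returns 1; on fillHeight([1, -1], 0, [0, 0, 0], [0, 0]): A returns 1, B returns 1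
import Mathlib
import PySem

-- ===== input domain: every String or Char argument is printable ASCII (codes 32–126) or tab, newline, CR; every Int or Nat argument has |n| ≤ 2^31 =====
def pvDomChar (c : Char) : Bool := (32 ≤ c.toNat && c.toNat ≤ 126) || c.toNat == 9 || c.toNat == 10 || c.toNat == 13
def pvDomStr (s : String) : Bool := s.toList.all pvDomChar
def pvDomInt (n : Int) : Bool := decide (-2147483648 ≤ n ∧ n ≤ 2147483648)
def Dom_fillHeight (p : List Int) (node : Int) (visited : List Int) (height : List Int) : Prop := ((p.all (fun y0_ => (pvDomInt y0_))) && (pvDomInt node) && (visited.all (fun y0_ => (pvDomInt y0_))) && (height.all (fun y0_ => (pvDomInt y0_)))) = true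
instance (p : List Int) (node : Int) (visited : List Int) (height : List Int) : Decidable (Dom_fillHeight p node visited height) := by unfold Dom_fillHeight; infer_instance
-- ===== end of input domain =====

-- B replaces A's recursion+memoization by an explicit iterative parent-pointer walk with a
-- stack.  Both Pythons mutate `visited`/`height` in place; the equivalence proved here is
-- about the RETURN value only (B is written to make the same in-place updates as A).

-- ===== PORT A =====
-- A's recursion is ported with fuel p.length + 1; under Pre_ each recursive call marks a
-- previously-unvisited node, so at most p.length + 1 calls occur and the fuel never runs out
-- (proved in cnt-based lemmas below).  The helper returns (return value, visited, height).
def fillA (p : List Int) : Nat → Int → List Int → List Int → Int × List Int × List Int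
  | 0, _, visited, height => (0, visited, height)
  | fuel+1, node, visited, height =>
    if PySem.List.pyGetD p node 0 = -1 then
      (0, PySem.List.pySetD visited node 1, height)
    else if PySem.List.pyGetD visited node 0 ≠ 0 then
      (PySem.List.pyGetD height node 0, visited, height)
    else
      let visited1 := PySem.List.pySetD visited node 1
      let r := fillA p fuel (PySem.List.pyGetD p node 0) visited1 height
      let height1 := PySem.List.pySetD r.2.2 node (1 + r.1)
      (PySem.List.pyGetD height1 node 0, r.2.1, height1)

def fillHeight (p : List Int) (node : Int) (visited : List Int) (height : List Int) : Int :=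
  (fillA p (p.length + 1) node visited height).1

-- ===== PORT B =====
-- The while loop, with the same fuel bound (each iteration marks an unvisited node).
-- Python's stack.append/stack.pop at the END are modelled by cons/head (same LIFO order).
-- Returns (cur at loop exit, visited, stack).
def walkB (p : List Int) : Nat → Int → List Int → List Int → Int × List Int × List Int
  | 0, cur, visited, stack => (cur, visited, stack)
  | fuel+1, cur, visited, stack =>
    if PySem.List.pyGetD p cur 0 ≠ -1 ∧ PySem.List.pyGetD visited cur 0 = 0 then
      walkB p fuel (PySem.List.pyGetD p cur 0) (PySem.List.pySetD visited cur 1) (cur :: stack)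
    else (cur, visited, stack)

-- 'while stack: d += 1; height[stack.pop()] = d' ; returns (d, height)
def assignB : List Int → Int → List Int → Int × List Int
  | [], d, height => (d, height)
  | top :: rest, d, height => assignB rest (d + 1) (PySem.List.pySetD height top (d + 1))

def fillHeight_alt (p : List Int) (node : Int) (visited : List Int) (height : List Int) : Int :=
  let w := walkB p (p.length + 1) node visited []
  let d0 : Int := if PySem.List.pyGetD p w.1 0 = -1 then 0 else PySem.List.pyGetD height w.1 0
  (assignB w.2.2 d0 height).1

-- ===== PRECONDITION & SPEC =====
-- Exactly the closed-form shapes on which A cannot raise: node must be a valid index of p and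
-- visited, and then either (a) node is a root (A only writes visited[node]), or (b) node is
-- already visited and height[node] exists (A only reads it), or (c) the general walk case:
-- three parallel tables of equal length whose parent entries are all valid indices.  A raises
-- IndexError exactly when an out-of-range index is REACHED along the walk, so Pre_ also
-- excludes some inputs on which A returns because the ill-formed part of the table is never
-- reached (see claim cites; B returns the same value on those inputs).
def Pre_fillHeight (p : List Int) (node : Int) (visited : List Int) (height : List Int) : Prop :=
  PySem.Raise.InRange p.length node ∧ PySem.Raise.InRange visited.length node ∧
  (PySem.List.pyGetD p node 0 = -1 ∨
   (PySem.List.pyGetD visited node 0 ≠ 0 ∧ PySem.Raise.InRange height.length node) ∨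
   (visited.length = p.length ∧ height.length = p.length ∧
    ∀ x ∈ p, PySem.Raise.InRange p.length x))

instance (p : List Int) (node : Int) (visited : List Int) (height : List Int) : Decidable (Pre_fillHeight p node visited height) := by unfold Pre_fillHeight; infer_instance

def pvWitness_fillHeight : List Int × Int × List Int × List Int :=
  ([-1, 0, 1, 1], 3, [0, 0, 0, 0], [0, 0, 0, 0])

def Spec_fillHeight (p : List Int) (node : Int) (visited : List Int) (height : List Int) (out : Int) : Prop := out = fillHeight_alt p node visited height

instance (p : List Int) (node : Int) (visited : List Int) (height : List Int) (out : Int) : Decidable (Spec_fillHeight p node visited height out) := by unfold Spec_fillHeight; infer_instance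

-- ===== CLAIM =====
def Claim_equal_fillHeight : Prop := ∀ (p : List Int) (node : Int) (visited : List Int) (height : List Int), Dom_fillHeight p node visited height → Pre_fillHeight p node visited height → Spec_fillHeight p node visited height (fillHeight p node visited height)

-- ===== LEMMAS AND PROOFS =====

-- A valid Python index normalises to a Nat index below the length.
lemma idx_spec (n : Nat) (i : Int) (h : PySem.Raise.InRange n i) :
    ∃ j : Nat, PySem.List.pyIdx? n i = some j ∧ j < n := by
  obtain ⟨h1, h2⟩ := h
  unfold PySem.List.pyIdx?
  by_cases h3 : 0 ≤ i
  · rw [if_pos h3, if_pos h2]; exact ⟨i.toNat, rfl, by omega⟩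
  · rw [if_neg h3, if_pos h1]; exact ⟨n - (-i).toNat, rfl, by omega⟩

lemma pyGetD_eq_of_idx {α : Type} (xs : List α) (i : Int) (d : α) (j : Nat)
    (hj : PySem.List.pyIdx? xs.length i = some j) (hlt : j < xs.length) :
    PySem.List.pyGetD xs i d = xs[j] := by
  simp [PySem.List.pyGetD, PySem.List.pyGet?, hj, List.getElem?_eq_getElem hlt]

lemma pySetD_eq_of_idx {α : Type} (xs : List α) (i : Int) (v : α) (j : Nat)
    (hj : PySem.List.pyIdx? xs.length i = some j) :
    PySem.List.pySetD xs i v = xs.set j v := by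
  simp [PySem.List.pySetD, PySem.List.pySet?, hj]

-- pyIdx? only depends on the length, so it is stable under pySetD and length equalities.
lemma idx_spec_len {α : Type} (xs : List α) (n : Nat) (i : Int) (hlen : xs.length = n)
    (h : PySem.Raise.InRange n i) :
    ∃ j : Nat, PySem.List.pyIdx? xs.length i = some j ∧ j < xs.length := by
  subst hlen; exact idx_spec _ _ h

-- number of unvisited (zero) entries: the fuel measure
def cnt (v : List Int) : Nat := v.countP (fun x => decide (x = 0))

lemma cnt_set_lt (v : List Int) (j : Nat) (hj : j < v.length) (h0 : v[j] = 0) :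
    cnt (v.set j 1) < cnt v := by
  unfold cnt
  have h1 : 0 < v.countP (fun x => decide (x = 0)) :=
    List.countP_pos_iff.mpr ⟨v[j], List.getElem_mem hj, by simp [h0]⟩
  rw [List.countP_set hj, if_pos (by simp [h0]), if_neg (by simp)]
  omega

lemma fillA_height_len (p : List Int) :
    ∀ (fuel : Nat) (node : Int) (visited height : List Int),
      (fillA p fuel node visited height).2.2.length = height.length := by
  intro fuel
  induction fuel with
  | zero => intro node visited height; rfl
  | succ n ih =>
    intro node visited height
    simp only [fillA]
    split_ifs with h1 h2
    · rfl
    · rfl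
    · simp [PySem.List.length_pySetD, ih]

-- the walk accumulates the stack by prepending
lemma walkB_stack (p : List Int) :
    ∀ (fuel : Nat) (cur : Int) (visited stack : List Int),
      walkB p fuel cur visited stack =
        ((walkB p fuel cur visited []).1, (walkB p fuel cur visited []).2.1,
          (walkB p fuel cur visited []).2.2 ++ stack) := by
  intro fuel
  induction fuel with
  | zero => intro cur visited stack; simp [walkB]
  | succ n ih =>
    intro cur visited stack
    simp only [walkB]
    split_ifs with h
    · rw [ih _ _ (cur :: stack), ih _ _ [cur]]
      simp
    · simp

lemma assignB_fst (stack : List Int) :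
    ∀ (d : Int) (height : List Int), (assignB stack d height).1 = d + stack.length := by
  induction stack with
  | nil => intro d height; simp [assignB]
  | cons top rest ih =>
    intro d height
    simp only [assignB]
    rw [ih]
    simp; ring

-- the main correspondence: A's return value = (value at the stop node) + walk length
lemma main_lemma (p : List Int) (height : List Int)
    (hp : ∀ x ∈ p, PySem.Raise.InRange p.length x) (hh : height.length = p.length) :
    ∀ (fuel : Nat) (cur : Int) (visited : List Int),
      visited.length = p.length → PySem.Raise.InRange p.length cur →
      cnt visited < fuel →
      (fillA p fuel cur visited height).1 =
        (if PySem.List.pyGetD p (walkB p fuel cur visited []).1 0 = -1 then 0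
         else PySem.List.pyGetD height (walkB p fuel cur visited []).1 0)
          + ((walkB p fuel cur visited []).2.2.length : Int) := by
  intro fuel
  induction fuel with
  | zero => intro cur visited _ _ hcnt; omega
  | succ n ih =>
    intro cur visited hv hcur hcnt
    by_cases h1 : PySem.List.pyGetD p cur 0 = -1
    · simp only [fillA, walkB]
      simp [h1]
    · by_cases h2 : PySem.List.pyGetD visited cur 0 = 0
      · -- recursive call / loop step
        obtain ⟨jv, hjv, hjvlt⟩ := idx_spec_len visited p.length cur hv hcur
        have hv0 : visited[jv] = 0 := by
          rw [pyGetD_eq_of_idx visited cur 0 jv hjv hjvlt] at h2; exact h2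
        have hlen1 : (PySem.List.pySetD visited cur 1).length = p.length := by
          rw [PySem.List.length_pySetD]; exact hv
        have hcnt1 : cnt (PySem.List.pySetD visited cur 1) < n := by
          rw [pySetD_eq_of_idx visited cur 1 jv hjv]
          have := cnt_set_lt visited jv hjvlt hv0
          omega
        have hnext : PySem.Raise.InRange p.length (PySem.List.pyGetD p cur 0) :=
          hp _ (PySem.List.pyGetD_mem p 0 hcur)
        have hrec := ih (PySem.List.pyGetD p cur 0) (PySem.List.pySetD visited cur 1) hlen1 hnext hcnt1
        -- one step of A
        have hA : (fillA p (n + 1) cur visited height).1 =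
            PySem.List.pyGetD
              (PySem.List.pySetD
                (fillA p n (PySem.List.pyGetD p cur 0) (PySem.List.pySetD visited cur 1) height).2.2 cur
                (1 + (fillA p n (PySem.List.pyGetD p cur 0) (PySem.List.pySetD visited cur 1) height).1))
              cur 0 := by
          simp only [fillA]
          rw [if_neg h1, if_neg (by simp [h2])]
        -- read-after-write at cur
        set r := fillA p n (PySem.List.pyGetD p cur 0) (PySem.List.pySetD visited cur 1) height with hr
        have hrlen : r.2.2.length = p.length := by
          rw [hr, fillA_height_len]; exact hh
        obtain ⟨jh, hjh, hjhlt⟩ := idx_spec_len r.2.2 p.length cur hrlen hcur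
        have hread : (fillA p (n + 1) cur visited height).1 = 1 + r.1 := by
          rw [hA, pySetD_eq_of_idx _ _ _ jh hjh,
              pyGetD_eq_of_idx _ _ _ jh (by rw [List.length_set]; exact hjh)
                (by rw [List.length_set]; exact hjhlt)]
          exact List.getElem_set_self _
        -- one step of B's walk
        have hB : walkB p (n + 1) cur visited [] =
            walkB p n (PySem.List.pyGetD p cur 0) (PySem.List.pySetD visited cur 1) [cur] := by
          simp only [walkB]
          rw [if_pos ⟨h1, h2⟩]
        rw [hread, hB,
            walkB_stack p n (PySem.List.pyGetD p cur 0) (PySem.List.pySetD visited cur 1) [cur]]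
        rw [hrec]
        simp only [List.length_append, List.length_singleton]
        push_cast
        ring
      · -- stop at an already-visited node
        have hA : (fillA p (n + 1) cur visited height).1 = PySem.List.pyGetD height cur 0 := by
          simp only [fillA]
          rw [if_neg h1, if_pos h2]
        have hB : walkB p (n + 1) cur visited [] = (cur, visited, []) := by
          simp only [walkB]
          rw [if_neg (by simp [h2])]
        rw [hA, hB]
        simp [h1]

-- ===== VERDICT =====
theorem fillHeight_spec : Claim_equal_fillHeight := by
  intro p node visited height _ hpre
  obtain ⟨hnp, hnv, hcase⟩ := hpre
  unfold Spec_fillHeight fillHeight fillHeight_alt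
  have hlen1 : 1 ≤ p.length := by
    obtain ⟨a, b⟩ := hnp; omega
  rcases hcase with hroot | ⟨hvis, hnh⟩ | ⟨hv, hh, hp⟩
  · -- node is a root: both sides return 0
    obtain ⟨k, hk⟩ : ∃ k, p.length = k + 1 := ⟨p.length - 1, by omega⟩
    rw [hk]
    simp [fillA, walkB, assignB, hroot]
  · -- node already visited (and not a root, or both take the root branch)
    obtain ⟨k, hk⟩ : ∃ k, p.length = k + 1 := ⟨p.length - 1, by omega⟩
    rw [hk]
    by_cases hroot : PySem.List.pyGetD p node 0 = -1
    · simp [fillA, walkB, assignB, hroot]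
    · simp [fillA, walkB, assignB, hroot, hvis]
  · -- general case: the walk
    have hcnt : cnt visited < p.length + 1 := by
      have := List.countP_le_length (p := fun x : Int => decide (x = 0)) (l := visited)
      unfold cnt; omega
    rw [main_lemma p height hp hh (p.length + 1) node visited hv hnp hcnt]
    rw [assignB_fst]
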